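-- pv_equiv track=rewrite | github.com/JinchunChoi/LeetCode | Biweekly/24/2.py | findMinFibonacciNumbers
-- ===== SOURCE A (Python) =====
-- def findMinFibonacciNumbers(k: int) -> int:
--     def fibo(num):
--         if num in memo: return memo[num]
--         memo[num] = fibo(num - 1) + fibo(num - 2)
--         return memo[num]
--
--     memo = {1: 1, 2: 1}
--     cur_fibo = 50
--     fibo(cur_fibo) # precompute
--     cnt = 0
--
--     while k > 0:
--         for f in range(cur_fibo, 1, -1):
--             if memo[f] <= k:
--                 k -= memo[f]
--                 cur_fibo = f
--                 cnt += 1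
--                 break
--     return cnt
-- ===== SOURCE B (Python) =====
-- def findMinFibonacciNumbers(k: int) -> int:
--     # Recursive ascent: climb consecutive Fibonacci pairs until they exceed k,
--     # then on the way back down take each value out of the remainder with divmod.
--     # No table, no cap, no subtraction loop.
--     def go(a, b, r):
--         # a, b are consecutive Fibonacci numbers (a = F(n), b = F(n+1))
--         if a > r:
--             return 0, r
--         cnt, r = go(b, a + b, r)
--         q, r = divmod(r, a)
--         return cnt + q, r
--     return go(1, 1, k)[0]
-- ===== Notes on version B (the rewrite author's own statement) =====
-- stated objective: simpler
-- what changed: Replaces A's memoized Fibonacci dict and restarting while/for greedy-subtraction scan by a table-free recursive ascent over consecutive Fibonacci pairs that, on the unwind, extracts each value from the remainder with a single divmod.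
import Mathlib
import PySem

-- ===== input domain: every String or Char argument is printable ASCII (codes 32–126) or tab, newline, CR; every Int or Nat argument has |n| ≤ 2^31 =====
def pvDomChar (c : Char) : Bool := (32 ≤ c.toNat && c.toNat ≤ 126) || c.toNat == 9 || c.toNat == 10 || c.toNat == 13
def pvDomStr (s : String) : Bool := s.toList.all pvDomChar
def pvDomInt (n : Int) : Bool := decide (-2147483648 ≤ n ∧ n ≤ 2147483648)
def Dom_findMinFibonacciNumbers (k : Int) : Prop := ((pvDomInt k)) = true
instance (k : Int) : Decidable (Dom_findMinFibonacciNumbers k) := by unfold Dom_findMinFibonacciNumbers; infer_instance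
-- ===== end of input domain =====

-- B replaces A's memoized Fibonacci dict and restarting greedy-subtraction scan by a
-- table-free recursive ascent over Fibonacci pairs with one divmod per level on the unwind
-- (simpler decomposition, same result).


-- ===== PORT A =====
-- Python's inner memoized recursion `fibo`; the fuel only bounds the recursion depth and
-- is never exhausted on the call fibo(50) (the recursion bottoms out at memo keys 1 and 2).
def fiboA : Nat → Int → PySem.Dict Int Int → Int × PySem.Dict Int Int
  | 0, _, memo => (0, memo)
  | fuel+1, num, memo =>
    match memo.get? num with
    | some v => (v, memo)
    | none =>
      let r1 := fiboA fuel (num - 1) memo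
      let r2 := fiboA fuel (num - 2) r1.2
      let v := r1.1 + r2.1
      (v, r2.2.insert num v)

def memoA : PySem.Dict Int Int :=
  (fiboA 51 50 (PySem.Dict.ofList [(1, 1), (2, 1)])).2

-- Python's `memo[f]` in the for loop: keys 1..50 are always present and f ∈ [2,50],
-- so KeyError is unreachable and getD is exact here.
def scanA (k : Int) : List Int → Option Int
  | [] => none
  | f :: t => if memoA.getD f 0 ≤ k then some f else scanA k t

-- the outer `while k > 0` loop; fuel k.toNat suffices since each iteration subtracts ≥ 1.
-- The `none` branch (for loop finds no fib ≤ k) is unreachable in Python too: memo[2] = 1 ≤ k.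
def loopA : Nat → Int → Int → Int → Int
  | 0, _, _, cnt => cnt
  | fuel+1, k, cur, cnt =>
    if k > 0 then
      match scanA k (PySem.List.pyRange cur 1 (-1)) with
      | some f => loopA fuel (k - memoA.getD f 0) f (cnt + 1)
      | none => cnt
    else cnt

def findMinFibonacciNumbers (k : Int) : Int := loopA k.toNat k 50 0

-- ===== PORT B =====
-- Source B's recursive `go(a, b, r)`; the fuel only bounds the recursion depth and is never
-- exhausted on Dom (the pair exceeds any |k| ≤ 2^31 within 47 climbing steps).
-- `divmod(r, a)` is ported as floordiv/mod; a is a Fibonacci number ≥ 1, never 0.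
def goB : Nat → Int → Int → Int → Int × Int
  | 0, _, _, r => (0, r)
  | fuel+1, a, b, r =>
    if a > r then (0, r)
    else
      let p := goB fuel b (a + b) r
      (p.1 + PySem.Int.floordiv p.2 a, PySem.Int.mod p.2 a)

def findMinFibonacciNumbers_alt (k : Int) : Int := (goB 64 1 1 k).1

-- ===== PRECONDITION & SPEC =====
def Spec_findMinFibonacciNumbers (k : Int) (out : Int) : Prop := out = findMinFibonacciNumbers_alt k
instance (k : Int) (out : Int) : Decidable (Spec_findMinFibonacciNumbers k out) := by unfold Spec_findMinFibonacciNumbers; infer_instance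

-- ===== CLAIM (what is proved, stated in full; the proofs are below) =====
def Claim_equal_findMinFibonacciNumbers : Prop := ∀ (k : Int), Dom_findMinFibonacciNumbers k → Spec_findMinFibonacciNumbers k (findMinFibonacciNumbers k)

-- ===== LEMMAS AND PROOFS =====

-- iterative Fibonacci pairs; fv n = n-th Fibonacci number (fv 1 = fv 2 = 1)
def fibP : Nat → Int × Int
  | 0 => (0, 1)
  | n+1 => ((fibP n).2, (fibP n).1 + (fibP n).2)

def fv (n : Nat) : Int := (fibP n).1

theorem fv_rec (n : Nat) : fv (n + 2) = fv n + fv (n + 1) := by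
  simp [fv, fibP]

theorem fv_pos : ∀ n, n < 51 → 1 ≤ n → 1 ≤ fv n := by decide

theorem fv_mono_succ : ∀ a, a < 50 → 2 ≤ a → fv a ≤ fv (a + 1) := by decide

theorem fv_mono : ∀ a, a < 51 → ∀ b, b < 51 → 2 ≤ a → a ≤ b → fv a ≤ fv b := by
  intro a ha b
  induction b with
  | zero => intro _ _ hab; omega
  | succ n ih =>
    intro hb h2 hab
    rcases Nat.lt_or_ge a (n + 1) with h | h
    · exact le_trans (ih (by omega) h2 (by omega)) (fv_mono_succ n (by omega) (by omega))
    · have he : a = n + 1 := by omega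
      rw [he]

-- the invariant satisfied by A's memo dict: keys are exactly 1..m, values Fibonacci
def Good (m : Nat) (d : PySem.Dict Int Int) : Prop :=
  ∀ x : Int, d.get? x = if 1 ≤ x ∧ x ≤ (m : Int) then some (fv x.toNat) else none

theorem good_base : Good 2 (PySem.Dict.ofList [(1, 1), (2, 1)]) := by
  have h : PySem.Dict.ofList [((1 : Int), (1 : Int)), (2, 1)]
      = PySem.Dict.mk [(1, 1), (2, 1)] := by decide
  intro x
  rw [h, PySem.Dict.get?_mk_cons, PySem.Dict.get?_mk_cons]
  have hnil : (PySem.Dict.mk ([] : List (Int × Int))).get? x = none := rfl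
  rw [hnil]
  by_cases h1 : (1 : Int) = x
  · subst h1; decide
  · by_cases h2 : (2 : Int) = x
    · subst h2; decide
    · have b1 : ((1 : Int) == x) = false := by simp [h1]
      have b2 : ((2 : Int) == x) = false := by simp [h2]
      rw [b1, b2]
      simp only [if_false, Bool.false_eq_true]
      rw [if_neg]
      intro ⟨hl, hr⟩
      interval_cases x <;> simp_all

theorem fiboA_good : ∀ (fuel : Nat) (n : Nat), 1 ≤ n → n ≤ fuel →
    ∀ (d : PySem.Dict Int Int) (m : Nat), 2 ≤ m → Good m d →
    (fiboA fuel (n : Int) d).1 = fv n ∧ Good (max m n) (fiboA fuel (n : Int) d).2 := by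
  intro fuel
  induction fuel with
  | zero => intro n h1 h0; omega
  | succ fl ih =>
    intro n h1 hle d m hm hG
    by_cases hnm : n ≤ m
    · have hget : d.get? (n : Int) = some (fv n) := by
        rw [hG (n : Int), if_pos (⟨by exact_mod_cast h1, by exact_mod_cast hnm⟩ :
          1 ≤ (n : Int) ∧ (n : Int) ≤ (m : Int))]
        simp
      simp only [fiboA, hget]
      refine ⟨by trivial, ?_⟩
      rw [Nat.max_eq_left hnm]
      exact hG
    · replace hnm : m < n := by omega
      have hn3 : 3 ≤ n := by omega
      have hget : d.get? (n : Int) = none := by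
        rw [hG (n : Int), if_neg]
        intro ⟨_, hr⟩
        have : (m : Int) < (n : Int) := by exact_mod_cast hnm
        omega
      have hc1 : (n : Int) - 1 = ((n - 1 : Nat) : Int) := by push_cast [Nat.cast_sub (by omega : 1 ≤ n)]; ring
      have hc2 : (n : Int) - 2 = ((n - 2 : Nat) : Int) := by push_cast [Nat.cast_sub (by omega : 2 ≤ n)]; ring
      obtain ⟨e1, g1⟩ := ih (n - 1) (by omega) (by omega) d m hm hG
      have g1' : Good (n - 1) (fiboA fl ((n - 1 : Nat) : Int) d).2 := by
        rwa [Nat.max_eq_right (by omega)] at g1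
      obtain ⟨e2, g2⟩ := ih (n - 2) (by omega) (by omega) (fiboA fl ((n - 1 : Nat) : Int) d).2
        (n - 1) (by omega) g1'
      rw [Nat.max_eq_left (by omega)] at g2
      have hval : fv (n - 1) + fv (n - 2) = fv n := by
        have h2 : n - 2 + 2 = n := by omega
        have h1' : n - 2 + 1 = n - 1 := by omega
        have h := fv_rec (n - 2)
        rw [h2, h1'] at h
        omega
      have hcast : ((n - 1 : Nat) : Int) = (n : Int) - 1 := by
        push_cast [Nat.cast_sub (by omega : 1 ≤ n)]; ring
      simp only [fiboA, hget, hc1, hc2]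
      constructor
      · rw [e1, e2, hval]
      · rw [Nat.max_eq_right (by omega : m ≤ n)]
        intro x
        rw [PySem.Dict.get?_insert, g2 x]
        by_cases hx : x = (n : Int)
        · rw [if_pos hx, if_pos (⟨by rw [hx]; exact_mod_cast h1, by rw [hx]⟩ :
            1 ≤ x ∧ x ≤ (n : Int))]
          rw [e1, e2, hval, hx]
          simp
        · rw [if_neg hx]
          by_cases hcond : 1 ≤ x ∧ x ≤ ((n - 1 : Nat) : Int)
          · rw [if_pos hcond, if_pos ⟨hcond.1, by have := hcond.2; omega⟩]
          · rw [if_neg hcond, if_neg]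
            intro h
            obtain ⟨ha, hb⟩ := h
            exact hcond ⟨ha, by omega⟩

theorem memoA_good : Good 50 memoA := by
  have h50 : (50 : Int) = ((50 : Nat) : Int) := by norm_num
  have := (fiboA_good 51 50 (by omega) (by omega)
    (PySem.Dict.ofList [(1, 1), (2, 1)]) 2 (by omega) good_base).2
  rw [Nat.max_eq_right (by omega)] at this
  unfold memoA
  rw [h50]
  exact this

theorem fvA (c : Nat) (h1 : 1 ≤ c) (h50 : c ≤ 50) : memoA.getD (c : Int) 0 = fv c := by
  have hget : memoA.get? (c : Int) = some (fv c) := by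
    rw [memoA_good (c : Int), if_pos (by constructor <;> [exact_mod_cast h1; exact_mod_cast h50])]
    simp
  rw [PySem.Dict.getD_eq_get?_getD, hget]
  rfl

-- [fv c, fv (c-1), ..., fv 1]
def dv : Nat → List Int
  | 0 => []
  | n+1 => fv (n + 1) :: dv n

theorem mem_dv {x : Int} : ∀ {c : Nat}, x ∈ dv c → ∃ j, 1 ≤ j ∧ j ≤ c ∧ x = fv j := by
  intro c
  induction c with
  | zero => intro h; simp [dv] at h
  | succ n ih =>
    intro h
    rcases List.mem_cons.mp h with h | h
    · exact ⟨n + 1, by omega, by omega, h⟩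
    · obtain ⟨j, h1, h2, h3⟩ := ih h
      exact ⟨j, h1, by omega, h3⟩

theorem dv_split : ∀ c i : Nat, i ≤ c →
    ∃ p, dv c = p ++ dv i ∧ ∀ x ∈ p, ∃ j, i < j ∧ j ≤ c ∧ x = fv j := by
  intro c
  induction c with
  | zero => intro i hi; exact ⟨[], by simp [show i = 0 by omega], by simp⟩
  | succ n ih =>
    intro i hi
    by_cases h : i = n + 1
    · exact ⟨[], by simp [h], by simp⟩
    · obtain ⟨p, hp, hmem⟩ := ih i (by omega)
      refine ⟨fv (n + 1) :: p, by simp [dv, hp], ?_⟩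
      intro x hx
      rcases List.mem_cons.mp hx with hx | hx
      · exact ⟨n + 1, by omega, by omega, hx⟩
      · obtain ⟨j, h1, h2, h3⟩ := hmem x hx
        exact ⟨j, h1, by omega, h3⟩

-- ---- repeated subtraction of one value (proof-side model of A's greedy steps) ----

def whileB : Nat → Int → Int × Int → Int × Int
  | 0, _, s => s
  | fuel+1, f, s => if f ≤ s.1 then whileB fuel f (s.1 - f, s.2 + 1) else s

theorem whileB_add : ∀ (fuel : Nat) (f k c : Int),
    whileB fuel f (k, c) = ((whileB fuel f (k, 0)).1, c + (whileB fuel f (k, 0)).2) := by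
  intro fuel
  induction fuel with
  | zero => intro f k c; simp [whileB]
  | succ n ih =>
    intro f k c
    by_cases h : f ≤ k
    · simp only [whileB, h, if_pos]
      rw [ih f (k - f) (c + 1), ih f (k - f) (0 + 1)]
      dsimp only
      simp only [Prod.mk.injEq]
      exact ⟨by trivial, by ring⟩
    · simp [whileB, h]

def bRun : List Int → Int → Int
  | [], _ => 0
  | f :: t, k => (whileB k.toNat f (k, 0)).2 + bRun t (whileB k.toNat f (k, 0)).1

theorem bRun_skip {f k : Int} (h : k < f) (t : List Int) : bRun (f :: t) k = bRun t k := by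
  have hw : whileB k.toNat f (k, 0) = (k, 0) := by
    cases hk : k.toNat with
    | zero => rfl
    | succ n => simp [whileB, not_le.mpr h]
  simp [bRun, hw]

theorem bRun_hit {f k : Int} (hf : 1 ≤ f) (hk : f ≤ k) (t : List Int) :
    bRun (f :: t) k = 1 + bRun (f :: t) (k - f) := by
  have hk1 : 1 ≤ k := le_trans hf hk
  obtain ⟨m, hm⟩ : ∃ m, k.toNat = m + 1 := ⟨k.toNat - 1, by omega⟩
  have hfuel : ∀ (fuel1 : Nat), ∀ (fuel2 : Nat) (f k c : Int), 1 ≤ f →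
      k.toNat ≤ fuel1 → k.toNat ≤ fuel2 → whileB fuel1 f (k, c) = whileB fuel2 f (k, c) := by
    intro fuel1
    induction fuel1 with
    | zero =>
      intro fuel2 f k c hf h1 h2
      have hk : k ≤ 0 := by omega
      have hnle : ¬ f ≤ k := by omega
      cases fuel2 with
      | zero => rfl
      | succ n => simp [whileB, hnle]
    | succ n ih =>
      intro fuel2 f k c hf h1 h2
      by_cases h : f ≤ k
      · have hk1 : 1 ≤ k := le_trans hf h
        cases fuel2 with
        | zero => omega
        | succ m =>
          simp only [whileB, h, if_pos]
          exact ih m f (k - f) (c + 1) hf (by omega) (by omega)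
      · cases fuel2 with
        | zero => simp [whileB, h]
        | succ m => simp [whileB, h]
  have step : whileB k.toNat f (k, 0) = ((whileB (k - f).toNat f (k - f, 0)).1,
      1 + (whileB (k - f).toNat f (k - f, 0)).2) := by
    rw [hm]
    simp only [whileB, hk, if_pos]
    rw [hfuel m (k - f).toNat f (k - f) (0 + 1) hf (by omega) (by omega)]
    rw [whileB_add]
    norm_num
  simp only [bRun, step]
  ring

theorem bRun_nonpos : ∀ (l : List Int) (k : Int), k ≤ 0 → (∀ f ∈ l, 1 ≤ f) → bRun l k = 0 := by
  intro l
  induction l with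
  | nil => intro k _ _; rfl
  | cons f t ih =>
    intro k hk hl
    rw [bRun_skip (by have := hl f (by simp); omega) t]
    exact ih k hk (fun f hf => hl f (by simp [hf]))

-- ---- A-side scan characterisation ----

theorem scan_spec : ∀ (c : Nat), 2 ≤ c → c ≤ 50 → ∀ (k : Int), 1 ≤ k →
    ∃ i : Nat, 2 ≤ i ∧ i ≤ c ∧ scanA k (PySem.List.pyRange (c : Int) 1 (-1)) = some (i : Int) ∧
      fv i ≤ k ∧ ∀ j : Nat, i < j → j ≤ c → k < fv j := by
  intro c
  induction c with
  | zero => intro h; omega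
  | succ n ih =>
    intro h2 h50 k hk
    rw [PySem.List.pyRange_neg_one_cons (by push_cast; omega)]
    have hfa : memoA.getD ((n + 1 : Nat) : Int) 0 = fv (n + 1) := fvA (n + 1) (by omega) (by omega)
    by_cases hc : memoA.getD ((n + 1 : Nat) : Int) 0 ≤ k
    · refine ⟨n + 1, h2, le_refl _, ?_, ?_, ?_⟩
      · simp only [scanA]
        rw [if_pos hc]
      · rw [← hfa]; exact hc
      · intro j hj1 hj2; omega
    · have hn2 : 2 ≤ n := by
        by_contra hn
        have hn1 : n = 1 := by omega
        apply hc
        rw [hfa, hn1]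
        calc fv 2 = 1 := by decide
          _ ≤ k := hk
      have heq : ((n + 1 : Nat) : Int) - 1 = ((n : Nat) : Int) := by push_cast; omega
      obtain ⟨i, hi2, hin, hscan, hfv, hgt⟩ := ih hn2 (by omega) k hk
      refine ⟨i, hi2, by omega, ?_, hfv, ?_⟩
      · simp only [scanA, if_neg hc]
        rw [heq]
        exact hscan
      · intro j hj1 hj2
        by_cases hjn : j ≤ n
        · exact hgt j hj1 hjn
        · have hje : j = n + 1 := by omega
          subst hje
          rw [hfa] at hc
          omega

-- ---- main induction: A's loop equals bRun over the full descending value list ----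

theorem mainA : ∀ (n : Nat) (k : Int), k.toNat ≤ n → ∀ (fuel : Nat), k.toNat ≤ fuel →
    ∀ (cur : Nat), 2 ≤ cur → cur ≤ 50 → (cur = 50 ∨ k < fv (cur + 1)) → ∀ (cnt : Int),
    loopA fuel k (cur : Int) cnt = cnt + bRun (dv 50) k := by
  intro n
  induction n with
  | zero =>
    intro k hk fuel hfuel cur h2 h50 hinv cnt
    have hk0 : k ≤ 0 := by omega
    have hz : bRun (dv 50) k = 0 := by
      apply bRun_nonpos _ _ hk0
      intro f hf
      obtain ⟨j, hj1, hj2, hj3⟩ := mem_dv hf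
      rw [hj3]; exact fv_pos j (by omega) hj1
    cases fuel with
    | zero => simp [loopA, hz]
    | succ m => simp [loopA, not_lt.mpr hk0, hz]
  | succ m ih =>
    intro k hk fuel hfuel cur h2 h50 hinv cnt
    by_cases hk0 : k > 0
    · obtain ⟨fl, hfl⟩ : ∃ fl, fuel = fl + 1 := ⟨fuel - 1, by omega⟩
      subst hfl
      have hk1 : (1 : Int) ≤ k := hk0
      obtain ⟨i, hi2, hicur, hscan, hfvle, hgt⟩ := scan_spec cur h2 h50 k hk1
      have hbig : ∀ j : Nat, i < j → j ≤ 50 → k < fv j := by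
        intro j hj1 hj2
        by_cases hjc : j ≤ cur
        · exact hgt j hj1 hjc
        · rcases hinv with h | h
          · omega
          · calc k < fv (cur + 1) := h
              _ ≤ fv j := fv_mono (cur + 1) (by omega) j (by omega) (by omega) (by omega)
      have hfvpos : 1 ≤ fv i := fv_pos i (by omega) (by omega)
      have hstep : loopA (fl + 1) k (cur : Int) cnt = loopA fl (k - fv i) (i : Int) (cnt + 1) := by
        simp only [loopA, if_pos hk0, hscan]
        rw [fvA i (by omega) (by omega)]
      obtain ⟨p, hpsplit, hpmem⟩ := dv_split 50 i (by omega)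
      have hpgt : ∀ x ∈ p, k < x := by
        intro x hx
        obtain ⟨j, hj1, hj2, hj3⟩ := hpmem x hx
        rw [hj3]; exact hbig j hj1 hj2
      obtain ⟨i', hi'⟩ : ∃ i', i = i' + 1 := ⟨i - 1, by omega⟩
      have hdvi : dv i = fv i :: dv i' := by rw [hi']; rfl
      have hskip : ∀ (p t : List Int) (k : Int), (∀ x ∈ p, k < x) →
          bRun (p ++ t) k = bRun t k := by
        intro p
        induction p with
        | nil => intro t k _; rfl
        | cons f q ihp =>
          intro t k h
          rw [List.cons_append, bRun_skip (h f (by simp)) (q ++ t)]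
          exact ihp t k (fun x hx => h x (by simp [hx]))
      have hrw : bRun (dv 50) k = 1 + bRun (dv 50) (k - fv i) := by
        rw [hpsplit, hskip p _ k hpgt, hdvi, bRun_hit hfvpos hfvle (dv i'), ← hdvi]
        have hpgt' : ∀ x ∈ p, k - fv i < x := by
          intro x hx
          have := hpgt x hx
          omega
        rw [← hskip p (dv i) (k - fv i) hpgt', ← hpsplit]
      have hIH : loopA fl (k - fv i) (i : Int) (cnt + 1) = (cnt + 1) + bRun (dv 50) (k - fv i) := by
        apply ih (k - fv i) (by omega) fl (by omega) i hi2 (by omega) _ (cnt + 1)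
        by_cases hi50 : i = 50
        · exact Or.inl hi50
        · right
          have : k < fv (i + 1) := hbig (i + 1) (by omega) (by omega)
          omega
      rw [hstep, hIH, hrw]
      ring
    · replace hk0 : k ≤ 0 := by omega
      have hz : bRun (dv 50) k = 0 := by
        apply bRun_nonpos _ _ hk0
        intro f hf
        obtain ⟨j, hj1, hj2, hj3⟩ := mem_dv hf
        rw [hj3]; exact fv_pos j (by omega) hj1
      cases fuel with
      | zero => simp [loopA, hz]
      | succ m' => simp [loopA, not_lt.mpr hk0, hz]

-- ---- divmod pass over a descending list (proof-side model of B's unwind) ----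

def gdiv : List Int → Int → Int × Int
  | [], r => (0, r)
  | f :: t, r =>
    let s := gdiv t (PySem.Int.mod r f)
    (PySem.Int.floordiv r f + s.1, s.2)

theorem whileB_div : ∀ (fuel : Nat) (f k : Int), 1 ≤ f → 0 ≤ k → k.toNat ≤ fuel →
    whileB fuel f (k, 0) = (PySem.Int.mod k f, PySem.Int.floordiv k f) := by
  intro fuel
  induction fuel with
  | zero =>
    intro f k hf hk hfu
    have : k = 0 := by omega
    subst this
    simp [whileB, PySem.Int.mod_eq_emod_of_pos (by omega : (0:Int) < f),
      PySem.Int.floordiv_eq_ediv_of_pos (by omega : (0:Int) < f)]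
  | succ n ih =>
    intro f k hf hk hfu
    rw [PySem.Int.mod_eq_emod_of_pos (by omega : (0:Int) < f),
      PySem.Int.floordiv_eq_ediv_of_pos (by omega : (0:Int) < f)]
    by_cases h : f ≤ k
    · simp only [whileB, h, if_pos]
      rw [whileB_add, ih f (k - f) hf (by omega) (by omega)]
      rw [PySem.Int.mod_eq_emod_of_pos (by omega : (0:Int) < f),
        PySem.Int.floordiv_eq_ediv_of_pos (by omega : (0:Int) < f)]
      have hmod : (k - f) % f = k % f := Int.sub_emod_right k f
      have hdiv : (k - f) / f + 1 = k / f := by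
        have := Int.add_mul_ediv_right (k - f) 1 (by omega : f ≠ 0)
        simp at this
        omega
      simp only [hmod, Prod.mk.injEq, true_and]
      omega
    · have hlt : k < f := by omega
      have h1 : k % f = k := Int.emod_eq_of_lt hk hlt
      have h2 : k / f = 0 := Int.ediv_eq_zero_of_lt hk hlt
      simp [whileB, h, h1, h2]

theorem bRun_eq_gdiv : ∀ (l : List Int) (k : Int), 0 ≤ k → (∀ f ∈ l, 1 ≤ f) →
    bRun l k = (gdiv l k).1 := by
  intro l
  induction l with
  | nil => intro k _ _; rfl
  | cons f t ih =>
    intro k hk hl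
    have hf : 1 ≤ f := hl f (by simp)
    rw [bRun, whileB_div k.toNat f k hf hk (le_refl _)]
    simp only [gdiv]
    rw [ih (PySem.Int.mod k f) (PySem.Int.mod_nonneg k (by omega)) (fun x hx => hl x (by simp [hx]))]

theorem gdiv_skip : ∀ (p t : List Int) (k : Int), 0 ≤ k → (∀ x ∈ p, k < x) →
    gdiv (p ++ t) k = gdiv t k := by
  intro p
  induction p with
  | nil => intro t k _ _; rfl
  | cons f q ih =>
    intro t k hk h
    have hf : k < f := h f (by simp)
    have hmod : PySem.Int.mod k f = k := by
      rw [PySem.Int.mod_eq_emod_of_pos (by omega : (0:Int) < f)]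
      exact Int.emod_eq_of_lt hk hf
    have hdiv : PySem.Int.floordiv k f = 0 := by
      rw [PySem.Int.floordiv_eq_ediv_of_pos (by omega : (0:Int) < f)]
      exact Int.ediv_eq_zero_of_lt hk hf
    simp only [List.cons_append, gdiv, hmod, hdiv]
    rw [ih t k hk (fun x hx => h x (by simp [hx]))]
    simp

theorem gdiv_append : ∀ (l1 l2 : List Int) (k : Int),
    gdiv (l1 ++ l2) k = ((gdiv l1 k).1 + (gdiv l2 (gdiv l1 k).2).1, (gdiv l2 (gdiv l1 k).2).2) := by
  intro l1
  induction l1 with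
  | nil => intro l2 k; simp [gdiv]
  | cons f t ih =>
    intro l2 k
    simp only [List.cons_append, gdiv, ih]
    simp [add_assoc]

-- segc c N = [fv N, fv (N-1), …, fv (N-c+1)]
def segc : Nat → Nat → List Int
  | 0, _ => []
  | c+1, N => fv N :: segc c (N - 1)

theorem segc_snoc : ∀ (c N : Nat), c ≤ N → segc (c + 1) N = segc c N ++ [fv (N - c)] := by
  intro c
  induction c with
  | zero => intro N _; simp [segc]
  | succ m ih =>
    intro N hc
    have h2 : segc (m + 1 + 1) N = fv N :: segc (m + 1) (N - 1) := rfl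
    rw [h2, ih (N - 1) (by omega), show N - 1 - m = N - (m + 1) from by omega]
    rfl

theorem dv_eq_segc : ∀ n, dv n = segc n n := by
  intro n
  induction n with
  | zero => rfl
  | succ m ih => simp only [dv, segc, Nat.add_sub_cancel, ih]

theorem goB_seg : ∀ (c fuel n N : Nat) (k : Int), n + c = N + 1 → 1 ≤ n → N ≤ 46 →
    c < fuel → (∀ m, n ≤ m → m ≤ N → fv m ≤ k) → k < fv (N + 1) →
    goB fuel (fv n) (fv (n + 1)) k = gdiv (segc c N) k := by
  intro c
  induction c with
  | zero =>
    intro fuel n N k hc h1 hN hfu _ hlt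
    obtain ⟨fl, hfl⟩ : ∃ fl, fuel = fl + 1 := ⟨fuel - 1, by omega⟩
    subst hfl
    have hn : n = N + 1 := by omega
    subst hn
    simp only [goB, segc, gdiv]
    rw [if_pos (by omega : fv (N + 1) > k)]
  | succ c ih =>
    intro fuel n N k hc h1 hN hfu hall hlt
    obtain ⟨fl, hfl⟩ : ∃ fl, fuel = fl + 1 := ⟨fuel - 1, by omega⟩
    subst hfl
    have hle : fv n ≤ k := hall n (le_refl _) (by omega)
    have hrec : goB fl (fv (n + 1)) (fv (n + 1 + 1)) k = gdiv (segc c N) k := by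
      apply ih fl (n + 1) N k (by omega) (by omega) hN (by omega)
        (fun m hm1 hm2 => hall m (by omega) hm2) hlt
    have hfv2 : fv n + fv (n + 1) = fv (n + 2) := (fv_rec n).symm
    simp only [goB]
    rw [if_neg (by omega : ¬ fv n > k)]
    rw [hfv2]
    rw [show n + 2 = n + 1 + 1 from rfl, hrec]
    rw [segc_snoc c N (by omega), gdiv_append]
    rw [show N - c = n by omega]
    simp [gdiv]

theorem findN : ∀ (c j : Nat) (k : Int), j + c = 46 → 1 ≤ j → fv j ≤ k → k < fv 47 →
    ∃ N, j ≤ N ∧ N ≤ 46 ∧ fv N ≤ k ∧ k < fv (N + 1) := by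
  intro c
  induction c with
  | zero =>
    intro j k hc h1 hle hlt
    exact ⟨46, by omega, le_refl _, by rw [show j = 46 by omega] at hle; exact hle, hlt⟩
  | succ m ih =>
    intro j k hc h1 hle hlt
    by_cases h : fv (j + 1) ≤ k
    · obtain ⟨N, hN1, hN2, hN3, hN4⟩ := ih (j + 1) k (by omega) (by omega) h hlt
      exact ⟨N, by omega, hN2, hN3, hN4⟩
    · exact ⟨j, le_refl _, by omega, hle, by omega⟩

-- ===== VERDICT (by name: the statement is the Claim_ definition above) =====
theorem findMinFibonacciNumbers_spec : Claim_equal_findMinFibonacciNumbers := by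
  intro k hdom
  have hbound : k ≤ 2147483648 := by
    unfold Dom_findMinFibonacciNumbers pvDomInt at hdom
    exact (of_decide_eq_true hdom).2
  unfold Spec_findMinFibonacciNumbers findMinFibonacciNumbers findMinFibonacciNumbers_alt
  have hA : loopA k.toNat k 50 0 = 0 + bRun (dv 50) k := by
    rw [show ((50 : Int)) = ((50 : Nat) : Int) from by norm_num]
    exact mainA k.toNat k (le_refl _) k.toNat (le_refl _) 50 (by norm_num) (le_refl _) (Or.inl rfl) 0
  by_cases hk : 1 ≤ k
  · have hf47 : k < fv 47 := by
      have : fv 47 = 2971215073 := by decide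
      omega
    obtain ⟨N, hN1, hN2, hN3, hN4⟩ := findN 45 1 k (by norm_num) (le_refl _)
      (by rw [(by decide : fv 1 = 1)]; exact hk) hf47
    have hall : ∀ m, 1 ≤ m → m ≤ N → fv m ≤ k := by
      intro m hm1 hm2
      by_cases hm : 2 ≤ m
      · exact le_trans (fv_mono m (by omega) N (by omega) hm hm2) hN3
      · have : m = 1 := by omega
        rw [this]
        have : fv 1 = 1 := by decide
        omega
    have hB : goB 64 1 1 k = gdiv (segc N N) k := by
      have h1 : fv 1 = 1 := by decide
      have h2 : fv 2 = 1 := by decide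
      have := goB_seg N 64 1 N k (by omega) (le_refl _) hN2 (by omega) hall hN4
      rw [h1, h2] at this
      exact this
    obtain ⟨p, hpsplit, hpmem⟩ := dv_split 50 N (by omega)
    have hpgt : ∀ x ∈ p, k < x := by
      intro x hx
      obtain ⟨j, hj1, hj2, hj3⟩ := hpmem x hx
      rw [hj3]
      calc k < fv (N + 1) := hN4
        _ ≤ fv j := fv_mono (N + 1) (by omega) j (by omega) (by omega) (by omega)
    rw [hA, hB, ← dv_eq_segc]
    rw [bRun_eq_gdiv (dv 50) k (by omega) (fun f hf => by
      obtain ⟨j, hj1, hj2, hj3⟩ := mem_dv hf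
      rw [hj3]; exact fv_pos j (by omega) hj1)]
    rw [hpsplit, gdiv_skip p (dv N) k (by omega) hpgt]
    ring
  · have hz : bRun (dv 50) k = 0 := by
      apply bRun_nonpos _ _ (by omega)
      intro f hf
      obtain ⟨j, hj1, hj2, hj3⟩ := mem_dv hf
      rw [hj3]; exact fv_pos j (by omega) hj1
    rw [hA, hz]
    simp [goB, show (1 : Int) > k by omega]
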